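-- pv_equiv track=rewrite | github.com/lightartw/textanalyze | agents/daily_summary_agent.py | _get_dominant_sentiment
-- ===== SOURCE A (Python) =====
-- from typing import Dict, Any, List
--
-- def _get_dominant_sentiment(sentiment_distribution: Dict[str, int]) -> str:
--     """
--     获取主导情绪
--
--     Args:
--         sentiment_distribution: 情绪分布
--
--     Returns:
--         str: 主导情绪
--     """
--     if not sentiment_distribution:
--         return "neutral"
--
--     max_count = max(sentiment_distribution.values())
--     dominant_sentiments = [k for k, v in sentiment_distribution.items() if v == max_count]
--
--     if len(dominant_sentiments) > 1:
--         return "mixed"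
--     return dominant_sentiments[0]
-- ===== SOURCE B (Python) =====
-- def _get_dominant_sentiment(sentiment_distribution):
--     if not sentiment_distribution:
--         return "neutral"
--     best_key = None
--     best_count = None
--     tie = False
--     for k, v in sentiment_distribution.items():
--         if best_count is None or v > best_count:
--             best_key, best_count, tie = k, v, False
--         elif v == best_count:
--             tie = True
--     return "mixed" if tie else best_key
-- ===== Notes on version B (the rewrite author's own statement) =====
-- stated objective: simpler
-- what changed: Replaces the separate max() pass plus list-comprehension tie collection with a single loop that tracks the best count, the first best key, and a tie flag.
import Mathlib
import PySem

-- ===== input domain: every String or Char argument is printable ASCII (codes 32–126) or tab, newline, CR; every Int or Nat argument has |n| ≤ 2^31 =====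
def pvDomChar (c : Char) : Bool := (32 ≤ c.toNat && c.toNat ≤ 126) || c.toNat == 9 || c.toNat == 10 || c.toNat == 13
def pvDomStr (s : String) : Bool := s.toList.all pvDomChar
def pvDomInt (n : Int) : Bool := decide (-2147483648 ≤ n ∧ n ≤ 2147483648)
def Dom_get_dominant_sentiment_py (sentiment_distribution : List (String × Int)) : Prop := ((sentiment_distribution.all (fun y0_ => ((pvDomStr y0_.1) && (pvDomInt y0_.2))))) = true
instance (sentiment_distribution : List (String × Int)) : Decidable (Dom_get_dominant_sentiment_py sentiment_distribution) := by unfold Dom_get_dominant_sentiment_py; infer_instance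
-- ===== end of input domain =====

-- B replaces A's max() pass plus tie-collecting comprehension by one loop keeping
-- (best key, best count, tie flag): simpler single traversal, same result.

-- ===== PORT A =====
-- `max(d.values())` (guarded nonempty), then the keys whose value equals the max,
-- then the len>1 test; `dominant_sentiments[0]` via pyGet? (provably nonempty here).
def get_dominant_sentiment_py (sentiment_distribution : List (String × Int)) : String :=
  if sentiment_distribution = [] then "neutral"
  else
    let max_count : Int :=
      (PySem.List.max? (sentiment_distribution.map (fun p => p.2)) (fun v => v)).getD 0
    let dominant_sentiments : List String :=
      (sentiment_distribution.filter (fun p => p.2 == max_count)).map (fun p => p.1)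
    if dominant_sentiments.length > 1 then "mixed"
    else (PySem.List.pyGet? dominant_sentiments 0).getD ""

-- ===== PORT B =====
-- B's loop body: state = (best so far (key, count) — none before the first item —, tie flag).
def altStep (s : Option (String × Int) × Bool) (p : String × Int) :
    Option (String × Int) × Bool :=
  match s with
  | (none, _) => (some p, false)
  | (some (bk, bc), tie) =>
    if p.2 > bc then (some p, false)
    else if p.2 = bc then (some (bk, bc), true)
    else (some (bk, bc), tie)

def get_dominant_sentiment_py_alt (sentiment_distribution : List (String × Int)) : String :=
  if sentiment_distribution = [] then "neutral"
  else
    match sentiment_distribution.foldl altStep (none, false) with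
    | (some (bk, _), tie) => if tie then "mixed" else bk
    | (none, _) => "neutral"   -- unreachable: the list is nonempty

-- ===== PRECONDITION & SPEC =====
def Spec_get_dominant_sentiment_py (sentiment_distribution : List (String × Int)) (out : String) : Prop := out = get_dominant_sentiment_py_alt sentiment_distribution
instance (sentiment_distribution : List (String × Int)) (out : String) : Decidable (Spec_get_dominant_sentiment_py sentiment_distribution out) := by unfold Spec_get_dominant_sentiment_py; infer_instance

-- ===== CLAIM (what is proved, stated in full; the proofs are below) =====
def Claim_equal_get_dominant_sentiment_py : Prop := ∀ (sentiment_distribution : List (String × Int)), Dom_get_dominant_sentiment_py sentiment_distribution → Spec_get_dominant_sentiment_py sentiment_distribution (get_dominant_sentiment_py sentiment_distribution)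

-- ===== LEMMAS AND PROOFS =====

-- running max of the values, seeded with bc
def runMax (bc : Int) (xs : List (String × Int)) : Int :=
  xs.foldl (fun a p => max a p.2) bc

-- first key among xs whose value is m (default unused on our calls)
def firstKey (xs : List (String × Int)) (m : Int) : String :=
  ((xs.find? (fun p => p.2 == m)).map (fun p => p.1)).getD ""

-- number of entries whose value is m
def cntEq (xs : List (String × Int)) (m : Int) : Nat :=
  xs.countP (fun p => p.2 == m)

theorem bc_le_runMax (bc : Int) (xs : List (String × Int)) : bc ≤ runMax bc xs := by
  induction xs generalizing bc with
  | nil => simp [runMax]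
  | cons p t ih =>
    have := ih (max bc p.2)
    simp only [runMax, List.foldl_cons] at *
    exact le_trans (le_max_left _ _) this

theorem foldB (xs : List (String × Int)) : ∀ (bk : String) (bc : Int) (tie : Bool),
    xs.foldl altStep (some (bk, bc), tie) =
      (some (if bc < runMax bc xs then firstKey xs (runMax bc xs) else bk, runMax bc xs),
       if bc < runMax bc xs then decide (2 ≤ cntEq xs (runMax bc xs))
       else (tie || decide (1 ≤ cntEq xs bc))) := by
  induction xs with
  | nil => intro bk bc tie; simp [runMax, cntEq]
  | cons p t ih =>
    intro bk bc tie
    have hM : runMax bc (p :: t) = runMax (max bc p.2) t := by simp [runMax]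
    rcases lt_trichotomy bc p.2 with hlt | heq | hgt
    · -- strict improvement: reset to (p, false)
      have hstep : altStep (some (bk, bc), tie) p = (some (p.1, p.2), false) := by
        simp [altStep, hlt]
      have hmax : max bc p.2 = p.2 := max_eq_right hlt.le
      have hle : p.2 ≤ runMax p.2 t := bc_le_runMax _ _
      have hbc : bc < runMax p.2 t := lt_of_lt_of_le hlt hle
      rw [List.foldl_cons, hstep, ih p.1 p.2 false, hM, hmax, if_pos hbc, if_pos hbc]
      rcases eq_or_lt_of_le hle with hpe | hplt
      · -- the first element is (one of) the max
        have hfk : firstKey (p :: t) (runMax p.2 t) = p.1 := by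
          simp [firstKey, List.find?, ← hpe]
        have hcnt : cntEq (p :: t) (runMax p.2 t) = cntEq t p.2 + 1 := by
          simp [cntEq, List.countP_cons, ← hpe]
        rw [if_neg (by omega), hfk, hcnt]
        simp
        omega
      · -- the max is strictly later
        have hne : (p.2 == runMax p.2 t) = false := by
          simp [Int.ne_of_lt hplt]
        have hfk : firstKey (p :: t) (runMax p.2 t) = firstKey t (runMax p.2 t) := by
          simp [firstKey, List.find?, hne]
        have hcnt : cntEq (p :: t) (runMax p.2 t) = cntEq t (runMax p.2 t) := by
          simp [cntEq, List.countP_cons, hne]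
        rw [if_pos hplt, hfk, hcnt, if_pos hplt]
    · -- equal: set the tie flag
      have hstep : altStep (some (bk, bc), tie) p = (some (bk, bc), true) := by
        simp [altStep, heq, lt_irrefl]
      have hmax : max bc p.2 = bc := by omega
      rw [List.foldl_cons, hstep, ih bk bc true, hM, hmax]
      by_cases hbc : bc < runMax bc t
      · have hne : (p.2 == runMax bc t) = false := by
          simp; omega
        have hfk : firstKey (p :: t) (runMax bc t) = firstKey t (runMax bc t) := by
          simp [firstKey, List.find?, hne]
        have hcnt : cntEq (p :: t) (runMax bc t) = cntEq t (runMax bc t) := by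
          simp [cntEq, List.countP_cons, hne]
        simp [if_pos hbc, hfk, hcnt]
      · have hcnt : cntEq (p :: t) bc = cntEq t bc + 1 := by
          simp [cntEq, List.countP_cons, ← heq]
        simp [if_neg hbc, hcnt]
    · -- strictly smaller: nothing changes
      have h1 : ¬ p.2 > bc := by omega
      have h2 : ¬ p.2 = bc := by omega
      have hstep : altStep (some (bk, bc), tie) p = (some (bk, bc), tie) := by
        simp [altStep, h1, h2]
      have hmax : max bc p.2 = bc := by omega
      rw [List.foldl_cons, hstep, ih bk bc tie, hM, hmax]
      have hneM : (p.2 == runMax bc t) = false := by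
        have := bc_le_runMax bc t; simp; omega
      have hnebc : (p.2 == bc) = false := by simp; omega
      have hfk : firstKey (p :: t) (runMax bc t) = firstKey t (runMax bc t) := by
        simp [firstKey, List.find?, hneM]
      have hcnt : cntEq (p :: t) (runMax bc t) = cntEq t (runMax bc t) := by
        simp [cntEq, List.countP_cons, hneM]
      have hcnt2 : cntEq (p :: t) bc = cntEq t bc := by
        simp [cntEq, List.countP_cons, hnebc]
      by_cases hbc : bc < runMax bc t
      · simp [if_pos hbc, hfk, hcnt]
      · simp [if_neg hbc, hcnt2]

-- A's dominant list: length = cntEq, head = firstKey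
theorem filterA (xs : List (String × Int)) (m : Int) :
    ((xs.filter (fun p => p.2 == m)).map (fun p => p.1)).length = cntEq xs m := by
  simp [cntEq, List.countP_eq_length_filter]

theorem headA (xs : List (String × Int)) (m : Int) (h : 1 ≤ cntEq xs m) :
    (PySem.List.pyGet? ((xs.filter (fun p => p.2 == m)).map (fun p => p.1)) 0).getD ""
      = firstKey xs m := by
  induction xs with
  | nil => simp [cntEq] at h
  | cons p t ih =>
    by_cases hp : (p.2 == m) = true
    · simp [List.filter_cons, hp, firstKey, List.find?, PySem.List.pyGet?, PySem.List.pyIdx?]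
    · have h' : 1 ≤ cntEq t m := by
        simpa [cntEq, List.countP_cons, hp] using h
      simpa [List.filter_cons, hp, firstKey, List.find?, hp] using ih h'

theorem get_dominant_sentiment_py_spec' :
    ∀ (d : List (String × Int)),
      get_dominant_sentiment_py d = get_dominant_sentiment_py_alt d := by
  intro d
  match d with
  | [] => rfl
  | q :: t =>
    have hne : (q :: t : List (String × Int)) ≠ [] := by simp
    have hmax : PySem.List.max? ((q :: t).map (fun p => p.2)) (fun v => v)
        = some (runMax q.2 t) := by
      rw [List.map_cons, PySem.List.max?_id_cons]
      simp [runMax, List.foldl_map]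
    unfold get_dominant_sentiment_py get_dominant_sentiment_py_alt
    rw [if_neg hne, if_neg hne, List.foldl_cons]
    have hstep : altStep (none, false) q = (some (q.1, q.2), false) := by rfl
    rw [hstep, foldB t q.1 q.2 false, hmax]
    simp only [Option.getD_some]
    by_cases hq : q.2 < runMax q.2 t
    · -- the first element is below the max
      have hM : runMax q.2 (q :: t) = runMax q.2 t := by
        simp [runMax, max_self]
      have hneq : (q.2 == runMax q.2 t) = false := by simp; omega
      have hc : cntEq (q :: t) (runMax q.2 t) = cntEq t (runMax q.2 t) := by
        simp [cntEq, List.countP_cons, hneq]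
      have hcpos : 1 ≤ cntEq t (runMax q.2 t) := by
        -- the max of t's values is attained in t
        have : ∃ p ∈ t, p.2 = runMax q.2 t := by
          by_contra hno
          push_neg at hno
          have hlt : ∀ p ∈ t, p.2 < runMax q.2 t → True := fun _ _ _ => trivial
          -- show runMax q.2 t ≤ some bound < itself : derive via induction
          have key : ∀ (bc : Int) (xs : List (String × Int)),
              (∀ p ∈ xs, p.2 ≠ runMax q.2 t) → runMax bc xs = bc ∨ ∃ p ∈ xs, runMax bc xs = p.2 := by
            intro bc xs
            induction xs generalizing bc with
            | nil => intro _; left; rfl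
            | cons r s ihx =>
              intro hxs
              have := ihx (max bc r.2) (fun p hp => hxs p (List.mem_cons_of_mem _ hp))
              rcases this with h1 | ⟨p, hp, hpe⟩
              · rcases le_or_gt r.2 bc with hle | hlt
                · left; simp [runMax, List.foldl_cons] at h1 ⊢
                  rw [max_eq_left hle] at h1 ⊢; exact h1
                · right; exact ⟨r, List.mem_cons_self, by
                    simp [runMax, List.foldl_cons] at h1 ⊢
                    rw [max_eq_right hlt.le] at h1 ⊢; exact h1⟩
              · right; exact ⟨p, List.mem_cons_of_mem _ hp, by
                  simp [runMax, List.foldl_cons] at hpe ⊢; exact hpe⟩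
          rcases key q.2 t (fun p hp => hno p hp) with h1 | ⟨p, hp, hpe⟩
          · omega
          · exact hno p hp (hpe.symm)
        rcases this with ⟨p, hp, hpe⟩
        have hcp : List.countP (fun pr : String × Int => pr.2 == runMax q.2 t) t > 0 :=
          List.countP_pos_iff.mpr ⟨p, hp, by simp [hpe]⟩
        simpa [cntEq] using hcp
      have hfk : firstKey (q :: t) (runMax q.2 t) = firstKey t (runMax q.2 t) := by
        simp [firstKey, List.find?, hneq]
      rw [filterA]
      by_cases htie : 2 ≤ cntEq (q :: t) (runMax q.2 t)
      · simp [hq, hc.symm ▸ htie, htie]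
        omega
      · have h1 : cntEq (q :: t) (runMax q.2 t) = 1 := by
          have : 1 ≤ cntEq (q :: t) (runMax q.2 t) := by omega
          omega
        rw [if_neg (by omega)]
        rw [headA _ _ (by omega)]
        rw [hfk]
        simp [hq, hc ▸ h1]
    · -- the first element attains the max
      have hM : runMax q.2 t = q.2 := by
        have := bc_le_runMax q.2 t; omega
      have hc : cntEq (q :: t) (runMax q.2 t) = cntEq t q.2 + 1 := by
        simp [cntEq, List.countP_cons, hM]
      rw [filterA]
      by_cases htie : 1 ≤ cntEq t q.2
      · rw [if_pos (by omega)]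
        simp [hq, htie]
      · rw [if_neg (by omega)]
        rw [headA _ _ (by omega)]
        have hfk : firstKey (q :: t) (runMax q.2 t) = q.1 := by
          simp [firstKey, List.find?, hM]
        rw [hfk]
        simp [hq, htie]

-- ===== VERDICT (by name: the statement is the Claim_ definition above) =====
theorem get_dominant_sentiment_py_spec : Claim_equal_get_dominant_sentiment_py := by
  intro d _
  unfold Spec_get_dominant_sentiment_py
  exact get_dominant_sentiment_py_spec' d
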